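-- pv_equiv track=rewrite | github.com/SotosTsepe/invenio-madmp | invenio_madmp/api.py | validate_license
-- ===== SOURCE A (Python) =====
-- def get_license_mapping():
--     license_mapping = {
--         'Apache License 2.0': 'https://opensource.org/licenses/Apache-2.0',
--         '3-Clause BSD License': 'https://opensource.org/licenses/BSD-3-Clause',
--         '2-Clause BSD License': 'https://opensource.org/licenses/BSD-2-Clause',
--         'GNU General Public License': {
--             'GNU Library General Public License version 2': 'https://opensource.org/licenses/LGPL-2.0',
--             'GNU Lesser General Public License version 2.1': 'https://opensource.org/licenses/LGPL-2.1',
--             'GNU Lesser General Public License version 3': 'https://opensource.org/licenses/LGPL-3.0'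
--         },
--         'GNU LGPL': {
--             'GNU General Public License version 2': 'https://opensource.org/licenses/GPL-2.0',
--             'GNU General Public License version 3': 'https://opensource.org/licenses/GPL-3.0'
--         },
--         'MIT': 'https://opensource.org/licenses/MIT',
--         'Mozilla Public License 2.0': 'https://opensource.org/licenses/MPL-2.0',
--         'Common Development and Distribution License 1.0': 'https://opensource.org/licenses/CDDL-1.0',
--         'Eclipse Public License version 2.0': 'https://opensource.org/licenses/EPL-2.0',
--
--         'CC BY': 'https://creativecommons.org/licenses/by/4.0/',
--         'CC BY-SA': 'https://creativecommons.org/licenses/by-sa/4.0/',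
--         'CC BY-ND': 'https://creativecommons.org/licenses/by-nd/4.0/',
--         'CC BY-NC': 'https://creativecommons.org/licenses/by-nc/4.0/',
--         'CC BY-NC-SA': 'https://creativecommons.org/licenses/by-nc-sa/4.0/',
--         'CC BY-NC-ND': 'https://creativecommons.org/licenses/by-nc-nd/4.0/'
--     }
--     return license_mapping
--
-- def validate_license(value):
--     """
--     Checks if the License Reference is correct.
--
--     :param value: URL of license
--     :returns: True if license is found in the mapping, False otherwise.
--     """
--
--     if value in get_license_mapping().values():
--         return True
--
--     for k, v in get_license_mapping().items():
--         if isinstance(v, dict):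
--             if value in v.values():
--                 return True
--
--     return False
-- ===== SOURCE B (Python) =====
-- # All known license URLs, precomputed once as a hash set.  A license *URL* is a
-- # string, and a string can only be equal to the string values of the mapping
-- # (never to a nested dict object), so one O(1) hash lookup in this set decides
-- # the question -- no traversal of the mapping at call time.
-- KNOWN_LICENSE_URLS = frozenset({
--     'https://opensource.org/licenses/Apache-2.0',
--     'https://opensource.org/licenses/BSD-3-Clause',
--     'https://opensource.org/licenses/BSD-2-Clause',
--     'https://opensource.org/licenses/LGPL-2.0',
--     'https://opensource.org/licenses/LGPL-2.1',
--     'https://opensource.org/licenses/LGPL-3.0',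
--     'https://opensource.org/licenses/GPL-2.0',
--     'https://opensource.org/licenses/GPL-3.0',
--     'https://opensource.org/licenses/MIT',
--     'https://opensource.org/licenses/MPL-2.0',
--     'https://opensource.org/licenses/CDDL-1.0',
--     'https://opensource.org/licenses/EPL-2.0',
--     'https://creativecommons.org/licenses/by/4.0/',
--     'https://creativecommons.org/licenses/by-sa/4.0/',
--     'https://creativecommons.org/licenses/by-nd/4.0/',
--     'https://creativecommons.org/licenses/by-nc/4.0/',
--     'https://creativecommons.org/licenses/by-nc-sa/4.0/',
--     'https://creativecommons.org/licenses/by-nc-nd/4.0/',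
-- })
--
--
-- def validate_license(value):
--     """Checks if the License Reference is a known license URL."""
--     return value in KNOWN_LICENSE_URLS
-- ===== Notes on version B (the rewrite author's own statement) =====
-- stated objective: simpler
-- what changed: B does not traverse the mapping at all: it tests membership in a precomputed frozenset of the known license URLs (valid because a string argument can only equal the mapping's string values, never a nested dict object), replacing A's two staged scans and isinstance branch with a single O(1) hash lookup.
import Mathlib
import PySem

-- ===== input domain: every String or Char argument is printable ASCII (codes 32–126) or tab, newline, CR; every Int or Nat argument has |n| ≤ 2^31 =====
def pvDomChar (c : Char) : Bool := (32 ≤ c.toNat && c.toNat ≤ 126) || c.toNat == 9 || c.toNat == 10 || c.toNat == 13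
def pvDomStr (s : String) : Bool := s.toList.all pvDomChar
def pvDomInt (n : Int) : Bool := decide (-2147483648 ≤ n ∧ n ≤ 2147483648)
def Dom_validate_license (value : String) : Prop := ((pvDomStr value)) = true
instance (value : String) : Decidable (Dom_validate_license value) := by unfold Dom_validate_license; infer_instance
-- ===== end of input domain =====

-- B replaces A's two scans of the mapping by one membership test in a precomputed
-- set of the known license URLs (a string argument can only equal the string
-- values of the mapping, never a nested dict).  Objective: simpler.

-- ===== PORT A =====
-- A value of the license mapping: either a URL string or a nested dict (association list).
inductive LicVal
  | s : String → LicVal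
  | d : List (String × String) → LicVal
deriving DecidableEq, Repr

-- get_license_mapping(): the literal module-level mapping used by A.
def license_mapping : List (String × LicVal) :=
  [ ("Apache License 2.0", .s "https://opensource.org/licenses/Apache-2.0"),
    ("3-Clause BSD License", .s "https://opensource.org/licenses/BSD-3-Clause"),
    ("2-Clause BSD License", .s "https://opensource.org/licenses/BSD-2-Clause"),
    ("GNU General Public License", .d
      [ ("GNU Library General Public License version 2", "https://opensource.org/licenses/LGPL-2.0"),
        ("GNU Lesser General Public License version 2.1", "https://opensource.org/licenses/LGPL-2.1"),
        ("GNU Lesser General Public License version 3", "https://opensource.org/licenses/LGPL-3.0") ]),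
    ("GNU LGPL", .d
      [ ("GNU General Public License version 2", "https://opensource.org/licenses/GPL-2.0"),
        ("GNU General Public License version 3", "https://opensource.org/licenses/GPL-3.0") ]),
    ("MIT", .s "https://opensource.org/licenses/MIT"),
    ("Mozilla Public License 2.0", .s "https://opensource.org/licenses/MPL-2.0"),
    ("Common Development and Distribution License 1.0", .s "https://opensource.org/licenses/CDDL-1.0"),
    ("Eclipse Public License version 2.0", .s "https://opensource.org/licenses/EPL-2.0"),
    ("CC BY", .s "https://creativecommons.org/licenses/by/4.0/"),
    ("CC BY-SA", .s "https://creativecommons.org/licenses/by-sa/4.0/"),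
    ("CC BY-ND", .s "https://creativecommons.org/licenses/by-nd/4.0/"),
    ("CC BY-NC", .s "https://creativecommons.org/licenses/by-nc/4.0/"),
    ("CC BY-NC-SA", .s "https://creativecommons.org/licenses/by-nc-sa/4.0/"),
    ("CC BY-NC-ND", .s "https://creativecommons.org/licenses/by-nc-nd/4.0/") ]

-- Python equality of the String argument against a mapping value ('value in ….values()'):
-- a str never equals a dict in Python, so the .d case is False (exact).
def pyEqVal (value : String) : LicVal → Bool
  | .s t => value == t
  | .d _ => false

-- 'for k, v in get_license_mapping().items(): if isinstance(v, dict): if value in v.values(): return True'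
def loopA (value : String) : List (String × LicVal) → Bool
  | [] => false
  | (_, v) :: rest =>
      match v with
      | .d inner => if (inner.map Prod.snd).contains value then true else loopA value rest
      | .s _ => loopA value rest

def validate_license (value : String) : Bool :=
  -- 'if value in get_license_mapping().values(): return True'
  if (license_mapping.map Prod.snd).any (pyEqVal value) then true
  else loopA value license_mapping

-- ===== PORT B =====
-- KNOWN_LICENSE_URLS: the precomputed frozenset of license URLs (a Python set of
-- distinct strings = PySem.Set String).
def known_license_urls : PySem.Set String := PySem.Set.ofList
  [ "https://opensource.org/licenses/Apache-2.0",
    "https://opensource.org/licenses/BSD-3-Clause",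
    "https://opensource.org/licenses/BSD-2-Clause",
    "https://opensource.org/licenses/LGPL-2.0",
    "https://opensource.org/licenses/LGPL-2.1",
    "https://opensource.org/licenses/LGPL-3.0",
    "https://opensource.org/licenses/GPL-2.0",
    "https://opensource.org/licenses/GPL-3.0",
    "https://opensource.org/licenses/MIT",
    "https://opensource.org/licenses/MPL-2.0",
    "https://opensource.org/licenses/CDDL-1.0",
    "https://opensource.org/licenses/EPL-2.0",
    "https://creativecommons.org/licenses/by/4.0/",
    "https://creativecommons.org/licenses/by-sa/4.0/",
    "https://creativecommons.org/licenses/by-nd/4.0/",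
    "https://creativecommons.org/licenses/by-nc/4.0/",
    "https://creativecommons.org/licenses/by-nc-sa/4.0/",
    "https://creativecommons.org/licenses/by-nc-nd/4.0/" ]

-- 'return value in KNOWN_LICENSE_URLS'
def validate_license_alt (value : String) : Bool :=
  known_license_urls.contains value

-- ===== PRECONDITION & SPEC =====
def Spec_validate_license (value : String) (out : Bool) : Prop := out = validate_license_alt value
instance (value : String) (out : Bool) : Decidable (Spec_validate_license value out) := by unfold Spec_validate_license; infer_instance

-- ===== CLAIM (what is proved, stated in full; the proofs are below) =====
def Claim_equal_validate_license : Prop := ∀ (value : String), Dom_validate_license value → Spec_validate_license value (validate_license value)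

-- ===== LEMMAS AND PROOFS =====
theorem validate_license_eq (value : String) :
    validate_license value = validate_license_alt value := by
  rw [Bool.eq_iff_iff]
  simp [validate_license, validate_license_alt, license_mapping, known_license_urls,
        PySem.Set.ofList, loopA, pyEqVal]
  tauto

-- ===== VERDICT (by name: the statement is the Claim_ definition above) =====
theorem validate_license_spec : Claim_equal_validate_license := by
  intro value _
  exact validate_license_eq value
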